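-- pv_equiv track=rewrite | github.com/hitabratanath/DSA-FAANG | Dynamic Programming/MatrixChainMultiplication/02_boolean_parenthesization.py | count_ways_to_evaluate_true
-- ===== SOURCE A (Python) =====
-- def count_ways_to_evaluate_true(s):
--     def solve(i, j, is_true):
--         if i == j:
--             if is_true:
--                 return 1 if s[i] == 'T' else 0
--             else:
--                 return 1 if s[i] == 'F' else 0
--
--         ans = 0
--         for k in range(i + 1, j, 2):
--             left_true = solve(i, k, True)
--             left_false = solve(i, k, False)
--             right_true = solve(k + 1, j, True)
--             right_false = solve(k + 1, j, False)
--
--             if is_true: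
--                 if s[k] == '&':
--                     ans += left_true * right_true
--                 elif s[k] == '|':
--                     ans += left_true * right_true + left_true * right_false + left_false * right_true
--                 else:
--                     ans += left_true * right_false + left_false * right_true
--             else:
--                 if s[k] == '&':
--                     ans += left_true * right_false + left_false * right_true + left_false * right_false
--                 elif s[k] == '|':
--                     ans += left_false * right_false
--                 else:
--                     ans += left_true * right_true + left_false * right_false
--         return ans
--
--     return solve(0, len(s) - 1, True)
-- ===== SOURCE B (Python) =====
-- def count_ways_to_evaluate_true(s):
--     # Bottom-up interval DP: one table of (true_count, false_count) pairs per interval,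
--     # filled rows from the bottom, instead of A's exponential plain recursion.
--     n = len(s)
--     if n == 0:
--         return 0
--     tbl = {}
--     for i in range(n - 1, -1, -1):
--         for j in range(i, n):
--             if i == j:
--                 tbl[(i, j)] = (1 if s[i] == 'T' else 0, 1 if s[i] == 'F' else 0)
--             else:
--                 t = 0
--                 f = 0
--                 for k in range(i + 1, j, 2):
--                     lt, lf = tbl[(i, k)]
--                     rt, rf = tbl[(k + 1, j)]
--                     op = s[k]
--                     if op == '&':
--                         t += lt * rt
--                         f += lt * rf + lf * rt + lf * rf
--                     elif op == '|':
--                         t += lt * rt + lt * rf + lf * rt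
--                         f += lf * rf
--                     else:
--                         t += lt * rf + lf * rt
--                         f += lt * rt + lf * rf
--                 tbl[(i, j)] = (t, f)
--     return tbl[(0, n - 1)][0]
-- ===== Notes on version B (the rewrite author's own statement) =====
-- stated objective: faster
-- what changed: Replaces A's exponential plain recursion over (i, j, is_true) by a bottom-up interval DP that fills one table of (true_count, false_count) pairs per interval, so each interval is computed once.
import Mathlib
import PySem

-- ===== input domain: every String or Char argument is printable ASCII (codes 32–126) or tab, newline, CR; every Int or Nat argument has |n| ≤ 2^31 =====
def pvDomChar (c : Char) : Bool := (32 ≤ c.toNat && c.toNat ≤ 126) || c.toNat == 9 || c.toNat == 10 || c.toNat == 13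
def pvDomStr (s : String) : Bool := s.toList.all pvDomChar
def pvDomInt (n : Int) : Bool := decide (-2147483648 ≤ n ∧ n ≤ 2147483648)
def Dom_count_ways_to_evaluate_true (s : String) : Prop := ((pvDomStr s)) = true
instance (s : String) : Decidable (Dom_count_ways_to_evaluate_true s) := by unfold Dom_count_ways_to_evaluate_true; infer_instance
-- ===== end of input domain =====

-- B replaces A's exponential plain recursion by a bottom-up interval DP over one table of
-- (true_count, false_count) pairs; objective: faster.

-- ===== PORT A =====
-- A's inner 'solve(i, j, is_true)'.  's[i]' / 's[k]' are ported as pyGetD with an arbitrary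
-- default: every index actually read lies in range on every reachable call (0 ≤ i ≤ k < j ≤ len-1),
-- so the default is never returned and A never raises.
def pvSolveA (cs : List Char) (i j : Int) (isTrue : Bool) : Int :=
  if i = j then
    (if isTrue then (if PySem.List.pyGetD cs i ' ' = 'T' then 1 else 0)
     else (if PySem.List.pyGetD cs i ' ' = 'F' then 1 else 0))
  else
    (PySem.List.pyRange (i + 1) j 2).attach.foldl (fun ans kk =>
      let lt := pvSolveA cs i kk.1 true
      let lf := pvSolveA cs i kk.1 false
      let rt := pvSolveA cs (kk.1 + 1) j true
      let rf := pvSolveA cs (kk.1 + 1) j false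
      if isTrue then
        (if PySem.List.pyGetD cs kk.1 ' ' = '&' then ans + lt * rt
         else if PySem.List.pyGetD cs kk.1 ' ' = '|' then ans + (lt * rt + lt * rf + lf * rt)
         else ans + (lt * rf + lf * rt))
      else
        (if PySem.List.pyGetD cs kk.1 ' ' = '&' then ans + (lt * rf + lf * rt + lf * rf)
         else if PySem.List.pyGetD cs kk.1 ' ' = '|' then ans + lf * rf
         else ans + (lt * rt + lf * rf))) 0
termination_by (j - i).toNat
decreasing_by
  all_goals
    have h := (PySem.List.mem_pyRange_iff_of_pos (by norm_num) kk.1).mp kk.2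
    omega

def count_ways_to_evaluate_true (s : String) : Int :=
  pvSolveA s.toList 0 (PySem.Str.len s - 1) true

-- ===== PORT B =====
-- the inner 'for k in range(i+1, j, 2)' loop of Source B; 'tbl[(i,k)]' is ported as getD with
-- default (0, 0): the key is always present when the loop runs (proved below), so B never raises.
def pvBInner (cs : List Char) (tbl : PySem.Dict (Int × Int) (Int × Int)) (i j : Int) : Int × Int :=
  (PySem.List.pyRange (i + 1) j 2).foldl (fun tf k =>
    let l := tbl.getD (i, k) (0, 0)
    let r := tbl.getD (k + 1, j) (0, 0)
    if PySem.List.pyGetD cs k ' ' = '&' then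
      (tf.1 + l.1 * r.1, tf.2 + (l.1 * r.2 + l.2 * r.1 + l.2 * r.2))
    else if PySem.List.pyGetD cs k ' ' = '|' then
      (tf.1 + (l.1 * r.1 + l.1 * r.2 + l.2 * r.1), tf.2 + l.2 * r.2)
    else
      (tf.1 + (l.1 * r.2 + l.2 * r.1), tf.2 + (l.1 * r.1 + l.2 * r.2))) (0, 0)

-- the inner 'for j in range(i, n)' loop of Source B
def pvBRow (cs : List Char) (n i : Int) (tbl : PySem.Dict (Int × Int) (Int × Int)) :
    PySem.Dict (Int × Int) (Int × Int) :=
  (PySem.List.pyRange i n 1).foldl (fun tbl j =>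
    if i = j then
      tbl.insert (i, j)
        ((if PySem.List.pyGetD cs i ' ' = 'T' then 1 else 0),
         (if PySem.List.pyGetD cs i ' ' = 'F' then 1 else 0))
    else
      tbl.insert (i, j) (pvBInner cs tbl i j)) tbl

def count_ways_to_evaluate_true_alt (s : String) : Int :=
  let cs := s.toList
  let n : Int := PySem.Str.len s
  if n = 0 then 0
  else
    let tbl := (PySem.List.pyRange (n - 1) (-1) (-1)).foldl (fun tbl i => pvBRow cs n i tbl)
      PySem.Dict.empty
    (tbl.getD (0, n - 1) (0, 0)).1

-- ===== PRECONDITION & SPEC =====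
def Spec_count_ways_to_evaluate_true (s : String) (out : Int) : Prop := out = count_ways_to_evaluate_true_alt s
instance (s : String) (out : Int) : Decidable (Spec_count_ways_to_evaluate_true s out) := by unfold Spec_count_ways_to_evaluate_true; infer_instance

-- ===== CLAIM (what is proved, stated in full; the proofs are below) =====
def Claim_equal_count_ways_to_evaluate_true : Prop := ∀ (s : String), Dom_count_ways_to_evaluate_true s → Spec_count_ways_to_evaluate_true s (count_ways_to_evaluate_true s)

-- ===== LEMMAS AND PROOFS =====

-- the table invariant: every stored value is the pair of A's recursive values for its interval
def pvGood (cs : List Char) (d : PySem.Dict (Int × Int) (Int × Int)) : Prop :=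
  ∀ p v, d.get? p = some v → v = (pvSolveA cs p.1 p.2 true, pvSolveA cs p.1 p.2 false)

theorem pvSolveA_leaf_true (cs : List Char) (i : Int) :
    pvSolveA cs i i true = (if PySem.List.pyGetD cs i ' ' = 'T' then 1 else 0) := by
  rw [pvSolveA]; simp

theorem pvSolveA_leaf_false (cs : List Char) (i : Int) :
    pvSolveA cs i i false = (if PySem.List.pyGetD cs i ' ' = 'F' then 1 else 0) := by
  rw [pvSolveA]; simp

-- A's true/false loops at a split node, as plain folds (the attach is only for termination)
def pvGT (cs : List Char) (i j : Int) : Int → Int → Int := fun ans k =>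
  if PySem.List.pyGetD cs k ' ' = '&' then
    ans + pvSolveA cs i k true * pvSolveA cs (k + 1) j true
  else if PySem.List.pyGetD cs k ' ' = '|' then
    ans + (pvSolveA cs i k true * pvSolveA cs (k + 1) j true +
           pvSolveA cs i k true * pvSolveA cs (k + 1) j false +
           pvSolveA cs i k false * pvSolveA cs (k + 1) j true)
  else
    ans + (pvSolveA cs i k true * pvSolveA cs (k + 1) j false +
           pvSolveA cs i k false * pvSolveA cs (k + 1) j true)

def pvGF (cs : List Char) (i j : Int) : Int → Int → Int := fun ans k =>
  if PySem.List.pyGetD cs k ' ' = '&' then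
    ans + (pvSolveA cs i k true * pvSolveA cs (k + 1) j false +
           pvSolveA cs i k false * pvSolveA cs (k + 1) j true +
           pvSolveA cs i k false * pvSolveA cs (k + 1) j false)
  else if PySem.List.pyGetD cs k ' ' = '|' then
    ans + pvSolveA cs i k false * pvSolveA cs (k + 1) j false
  else
    ans + (pvSolveA cs i k true * pvSolveA cs (k + 1) j true +
           pvSolveA cs i k false * pvSolveA cs (k + 1) j false)

theorem pvSolveA_node_true (cs : List Char) (i j : Int) (hij : i ≠ j) :
    pvSolveA cs i j true = (PySem.List.pyRange (i + 1) j 2).foldl (pvGT cs i j) 0 := by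
  rw [pvSolveA, if_neg hij]
  exact List.foldl_attach (f := pvGT cs i j)

theorem pvSolveA_node_false (cs : List Char) (i j : Int) (hij : i ≠ j) :
    pvSolveA cs i j false = (PySem.List.pyRange (i + 1) j 2).foldl (pvGF cs i j) 0 := by
  rw [pvSolveA, if_neg hij]
  exact List.foldl_attach (f := pvGF cs i j)

theorem pvBInner_eq (cs : List Char) (d : PySem.Dict (Int × Int) (Int × Int)) (i j : Int)
    (hij : i ≠ j) (hgood : pvGood cs d)
    (hpres : ∀ k, k ∈ PySem.List.pyRange (i + 1) j 2 →
      d.contains (i, k) = true ∧ d.contains (k + 1, j) = true) :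
    pvBInner cs d i j = (pvSolveA cs i j true, pvSolveA cs i j false) := by
  have hget : ∀ (a b : Int), d.contains (a, b) = true →
      d.getD (a, b) (0, 0) = (pvSolveA cs a b true, pvSolveA cs a b false) := by
    intro a b hc
    rw [PySem.Dict.contains_eq_isSome_get?] at hc
    obtain ⟨v, hv⟩ := Option.isSome_iff_exists.mp hc
    rw [PySem.Dict.getD_of_get?_eq_some _ _ hv, hgood (a, b) v hv]
  rw [pvSolveA_node_true cs i j hij, pvSolveA_node_false cs i j hij, pvBInner,
    ← PySem.List.foldl_prod_mk (pvGT cs i j) (pvGF cs i j)]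
  apply PySem.List.foldl_congr_mem
  intro acc k hk
  obtain ⟨h1, h2⟩ := hpres k hk
  simp only [hget i k h1, hget (k + 1) j h2, pvGT, pvGF]
  split_ifs <;> rfl

-- the row loop preserves the invariant and fills row i up to column n-1
theorem pvBRowAux (cs : List Char) (n i : Int) :
    ∀ (m : Nat) (j0 : Int) (d : PySem.Dict (Int × Int) (Int × Int)),
      (n - j0).toNat = m → i ≤ j0 → pvGood cs d →
      (∀ i' j', i < i' → i' ≤ j' → j' < n → d.contains (i', j') = true) →
      (∀ j', i ≤ j' → j' < j0 → d.contains (i, j') = true) →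
      pvGood cs ((PySem.List.pyRange j0 n 1).foldl (fun tbl j =>
        if i = j then
          tbl.insert (i, j)
            ((if PySem.List.pyGetD cs i ' ' = 'T' then 1 else 0),
             (if PySem.List.pyGetD cs i ' ' = 'F' then 1 else 0))
        else
          tbl.insert (i, j) (pvBInner cs tbl i j)) d) ∧
      (∀ i' j', i ≤ i' → i' ≤ j' → j' < n →
        ((PySem.List.pyRange j0 n 1).foldl (fun tbl j =>
          if i = j then
            tbl.insert (i, j)
              ((if PySem.List.pyGetD cs i ' ' = 'T' then 1 else 0),
               (if PySem.List.pyGetD cs i ' ' = 'F' then 1 else 0))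
          else
            tbl.insert (i, j) (pvBInner cs tbl i j)) d).contains (i', j') = true) := by
  intro m
  induction m with
  | zero =>
    intro j0 d hm hij0 hgood hbelow hrow
    rw [PySem.List.pyRange_one_eq_nil (by omega)]
    simp only [List.foldl_nil]
    refine ⟨hgood, ?_⟩
    intro i' j' h1 h2 h3
    rcases lt_or_eq_of_le h1 with h | h
    · exact hbelow i' j' h h2 h3
    · subst h; exact hrow j' h2 (by omega)
  | succ m ih =>
    intro j0 d hm hij0 hgood hbelow hrow
    have hj0n : j0 < n := by omega
    rw [PySem.List.pyRange_one_cons hj0n, List.foldl_cons]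
    have hstep : (if i = j0 then
          d.insert (i, j0)
            ((if PySem.List.pyGetD cs i ' ' = 'T' then 1 else 0),
             (if PySem.List.pyGetD cs i ' ' = 'F' then 1 else 0))
        else d.insert (i, j0) (pvBInner cs d i j0)) =
        d.insert (i, j0) (pvSolveA cs i j0 true, pvSolveA cs i j0 false) := by
      by_cases hij : i = j0
      · subst hij
        rw [if_pos rfl, pvSolveA_leaf_true, pvSolveA_leaf_false]
      · rw [if_neg hij, pvBInner_eq cs d i j0 hij hgood]
        intro k hk
        have h := (PySem.List.mem_pyRange_iff_of_pos (by norm_num) k).mp hk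
        exact ⟨hrow k (by omega) (by omega), hbelow (k + 1) j0 (by omega) (by omega) hj0n⟩
    rw [hstep]
    apply ih (j0 + 1) _ (by omega) (by omega)
    · -- pvGood is preserved by the insert
      intro p v hpv
      rw [PySem.Dict.get?_insert] at hpv
      split at hpv
      · rename_i hp
        subst hp
        exact (Option.some.inj hpv).symm
      · exact hgood p v hpv
    · intro i' j' h1 h2 h3
      rw [PySem.Dict.contains_insert]
      rw [hbelow i' j' h1 h2 h3, Bool.or_true]
    · intro j' h1 h2
      rw [PySem.Dict.contains_insert]
      by_cases hj : j' = j0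
      · subst hj; simp
      · rw [hrow j' h1 (by omega), Bool.or_true]

-- the outer loop over rows i = n-1, …, 0
theorem pvColAux (cs : List Char) (n : Int) :
    ∀ (m : Nat) (i0 : Int) (d : PySem.Dict (Int × Int) (Int × Int)),
      (i0 + 1).toNat = m → pvGood cs d →
      (∀ i' j', i0 < i' → i' ≤ j' → j' < n → d.contains (i', j') = true) →
      pvGood cs ((PySem.List.pyRange i0 (-1) (-1)).foldl (fun tbl i => pvBRow cs n i tbl) d) ∧
      (∀ i' j', (0 ≤ i' ∨ i0 < i') → i' ≤ j' → j' < n →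
        ((PySem.List.pyRange i0 (-1) (-1)).foldl (fun tbl i => pvBRow cs n i tbl) d).contains
          (i', j') = true) := by
  intro m
  induction m with
  | zero =>
    intro i0 d hm hgood hbelow
    rw [PySem.List.pyRange_neg_one_eq_nil (by omega)]
    simp only [List.foldl_nil]
    refine ⟨hgood, ?_⟩
    intro i' j' h1 h2 h3
    exact hbelow i' j' (by omega) h2 h3
  | succ m ih =>
    intro i0 d hm hgood hbelow
    have h0 : (-1 : Int) < i0 := by omega
    rw [PySem.List.pyRange_neg_one_cons h0, List.foldl_cons]
    obtain ⟨hg1, hc1⟩ := pvBRowAux cs n i0 (n - i0).toNat i0 d rfl le_rfl hgood hbelow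
      (fun j' h1 h2 => absurd (lt_of_le_of_lt h1 h2) (lt_irrefl i0))
    rw [pvBRow]
    obtain ⟨hg2, hc2⟩ := ih (i0 - 1) _ (by omega) hg1
      (fun i' j' ha hb hc => hc1 i' j' (by omega) hb hc)
    refine ⟨hg2, ?_⟩
    intro i' j' h1 h2 h3
    exact hc2 i' j' (by omega) h2 h3

-- ===== VERDICT (by name: the statement is the Claim_ definition above) =====
theorem count_ways_to_evaluate_true_spec : Claim_equal_count_ways_to_evaluate_true := by
  unfold Claim_equal_count_ways_to_evaluate_true
  intro s _
  unfold Spec_count_ways_to_evaluate_true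
  unfold count_ways_to_evaluate_true count_ways_to_evaluate_true_alt
  simp only []
  by_cases hn : PySem.Str.len s = 0
  · rw [if_pos hn, hn]
    rw [pvSolveA]
    norm_num
    rw [show PySem.List.pyRange (0 + 1) (0 - 1) 2 = [] from rfl]
    simp
  · rw [if_neg hn]
    have hlen : PySem.Str.len s = (s.toList.length : Int) := PySem.Str.len_eq s
    have hpos : 1 ≤ PySem.Str.len s := by rw [hlen]; omega
    obtain ⟨hg, hc⟩ := pvColAux s.toList (PySem.Str.len s)
      (PySem.Str.len s - 1 + 1).toNat (PySem.Str.len s - 1) PySem.Dict.empty rfl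
      (fun p v h => by rw [PySem.Dict.get?_empty] at h; exact absurd h (by simp))
      (fun i' j' ha hb hc => by omega)
    have hcont := hc 0 (PySem.Str.len s - 1) (Or.inl le_rfl) (by omega) (by omega)
    rw [PySem.Dict.contains_eq_isSome_get?] at hcont
    obtain ⟨v, hv⟩ := Option.isSome_iff_exists.mp hcont
    rw [PySem.Dict.getD_of_get?_eq_some _ _ hv, hg _ v hv]
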